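-- pv_equiv track=rewrite | github.com/m1sterzer0/codejams | old/python/2010/1B/A.py | solve
-- ===== SOURCE A (Python) =====
-- def solve(inp) :
--     (n,m,existing,newdirs) = inp
--     d = set()
--     for s in existing :
--         a = splitDirs(s)
--         for aa in a : d.add(aa)
--     ans = 0
--     for s in newdirs :
--         a = splitDirs(s)
--         for aa in a :
--             if aa not in d : ans += 1; d.add(aa)
--     return "%d" % ans
--
-- def splitDirs(s) :
--     ans = []
--     x = ""
--     a = s[1:].split('/')
--     for aa in a :
--         x = x + '/' + aa
--         ans.append(x)
--     return ans
-- ===== SOURCE B (Python) =====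
-- def solve(inp):
--     (n, m, existing, newdirs) = inp
--     root = {}
--     for s in existing:
--         node = root
--         for c in s[1:].split('/'):
--             node = node.setdefault(c, {})
--     ans = 0
--     for s in newdirs:
--         node = root
--         for c in s[1:].split('/'):
--             if c not in node:
--                 node[c] = {}
--                 ans += 1
--             node = node[c]
--     return "%d" % ans
-- ===== Notes on version B (the rewrite author's own statement) =====
-- stated objective: alternative
-- what changed: Replaces A's flat set of accumulated prefix strings (splitDirs builds every '/'-joined prefix string and a set membership test counts the new ones) by a trie of nested dicts: existing paths are inserted component by component without counting, then each new path descends the trie and counts every child it has to create, so no prefix strings are ever built.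
import Mathlib
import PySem

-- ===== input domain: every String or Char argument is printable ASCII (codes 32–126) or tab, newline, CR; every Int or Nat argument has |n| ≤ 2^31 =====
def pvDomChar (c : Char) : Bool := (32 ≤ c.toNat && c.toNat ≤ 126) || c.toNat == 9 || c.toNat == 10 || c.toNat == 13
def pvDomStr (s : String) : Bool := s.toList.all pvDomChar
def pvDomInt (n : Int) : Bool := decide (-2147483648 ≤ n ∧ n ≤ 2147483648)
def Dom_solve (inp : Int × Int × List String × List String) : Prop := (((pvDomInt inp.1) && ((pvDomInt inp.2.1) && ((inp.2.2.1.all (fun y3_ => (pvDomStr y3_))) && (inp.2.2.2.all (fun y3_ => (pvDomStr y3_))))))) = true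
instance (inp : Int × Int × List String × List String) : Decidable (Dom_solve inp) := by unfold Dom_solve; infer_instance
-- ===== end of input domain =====

-- B replaces A's flat set of accumulated prefix strings by a trie (Python: nested dicts),
-- inserting existing paths silently and counting the children created while descending
-- with each new path; no prefix strings are built at all. Same result, different structure.

-- shared by both ports: s[1:].split('/') (slice = s[1:], splitOn = split('/'))
def comps (s : String) : List (List Char) :=
  PySem.Chars.splitOn (PySem.Chars.slice s.toList (some 1) none) ['/']

-- ===== PORT A =====
-- splitDirs, ported on List Char: the running string x accumulates x + '/' + aa
def splitDirs (s : String) : List (List Char) :=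
  ((comps s).foldl
    (fun (st : List (List Char) × List Char) aa =>
      (st.1 ++ [st.2 ++ '/' :: aa], st.2 ++ '/' :: aa)) ([], [])).1

def solve (inp : Int × Int × List String × List String) : String :=
  let d : PySem.Set (List Char) :=
    inp.2.2.1.foldl (fun d s => (splitDirs s).foldl PySem.Set.add d) PySem.Set.empty
  let st : Int × PySem.Set (List Char) :=
    inp.2.2.2.foldl (fun st s =>
      (splitDirs s).foldl (fun st aa =>
        if PySem.Set.contains st.2 aa then st else (st.1 + 1, PySem.Set.add st.2 aa)) st) (0, d)
  PySem.Int.toStr st.1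

-- ===== PORT B =====
-- the trie of nested dicts: a node is its (insertion-ordered) children list
mutual
inductive PTrie : Type where
  | node : PChildren → PTrie
inductive PChildren : Type where
  | nil  : PChildren
  | cons : List Char → PTrie → PChildren → PChildren
end

def findChild : PChildren → List Char → Option PTrie
  | .nil, _ => none
  | .cons k t r, c => if k = c then some t else findChild r c

def replaceChild : PChildren → List Char → PTrie → PChildren
  | .nil, _, _ => .nil
  | .cons k t r, c, t' => if k = c then .cons k t' r else .cons k t (replaceChild r c t')

def appendChild : PChildren → List Char → PTrie → PChildren
  | .nil, c, t' => .cons c t' .nil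
  | .cons k t r, c, t' => .cons k t (appendChild r c t')

-- functional rendering of Source B's mutable descent "node = node.setdefault(c, {})":
-- descend the component list, creating the missing children (no counting)
def insertPath : PTrie → List (List Char) → PTrie
  | t, [] => t
  | .node ch, c :: cs =>
    match findChild ch c with
    | some t => .node (replaceChild ch c (insertPath t cs))
    | none   => .node (appendChild ch c (insertPath (.node .nil) cs))

-- the counting descent: "if c not in node: node[c] = {}; ans += 1; node = node[c]"
def countPath : PTrie → List (List Char) → PTrie × Nat
  | t, [] => (t, 0)
  | .node ch, c :: cs =>
    match findChild ch c with
    | some t => let r := countPath t cs; (.node (replaceChild ch c r.1), r.2)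
    | none   => let r := countPath (.node .nil) cs; (.node (appendChild ch c r.1), r.2 + 1)

def solve_alt (inp : Int × Int × List String × List String) : String :=
  let root : PTrie :=
    inp.2.2.1.foldl (fun t s => insertPath t (comps s)) (PTrie.node .nil)
  let st : PTrie × Int :=
    inp.2.2.2.foldl (fun (st : PTrie × Int) s =>
      let r := countPath st.1 (comps s); (r.1, st.2 + (r.2 : Int))) (root, 0)
  PySem.Int.toStr st.2

-- ===== PRECONDITION & SPEC =====
def Spec_solve (inp : Int × Int × List String × List String) (out : String) : Prop := out = solve_alt inp
instance (inp : Int × Int × List String × List String) (out : String) : Decidable (Spec_solve inp out) := by unfold Spec_solve; infer_instance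

-- ===== CLAIM (what is proved, stated in full; the proofs are below) =====
def Claim_equal_solve : Prop := ∀ (inp : Int × Int × List String × List String), Dom_solve inp → Spec_solve inp (solve inp)

-- ===== LEMMAS AND PROOFS =====

-- the prefix string of a component list, and the list of nonempty component prefixes
def enc (cs : List (List Char)) : List Char := '/' :: PySem.Chars.join ['/'] cs

def Pfx (cs : List (List Char)) : List (List (List Char)) :=
  (List.range cs.length).map (fun i => cs.take (i + 1))

-- A's cumulative-prefix loop produces exactly the encoded nonempty prefixes
theorem fold_prefix_eq_map (t : List (List Char)) :
    ∀ (ans : List (List Char)) (x : List Char),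
    (t.foldl (fun (st : List (List Char) × List Char) aa =>
      (st.1 ++ [st.2 ++ '/' :: aa], st.2 ++ '/' :: aa)) (ans, x)).1
    = ans ++ (List.range t.length).map
        (fun i => x ++ '/' :: PySem.Chars.join ['/'] (t.take (i+1))) := by
  induction t with
  | nil => intro ans x; simp
  | cons a r ih =>
    intro ans x
    simp only [List.foldl_cons]
    rw [ih, List.length_cons, List.range_succ_eq_map]
    simp only [List.map_cons, List.map_map, List.take_succ_cons, List.take_zero,
      PySem.Chars.join_singleton, List.append_assoc, List.singleton_append]
    congr 2
    apply List.map_congr_left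
    intro i hi
    simp only [Function.comp_apply, Nat.succ_eq_add_one]
    have hlt : i < r.length := List.mem_range.mp hi
    have hne : r.take (i+1) ≠ ([] : List (List Char)) := by
      intro h
      rw [List.take_eq_nil_iff] at h
      rcases h with h | h
      · omega
      · subst h; simp at hlt
    obtain ⟨b, rest, hb⟩ := List.exists_cons_of_ne_nil hne
    rw [hb, PySem.Chars.join_cons_cons]
    simp

theorem splitDirs_eq (s : String) : splitDirs s = (Pfx (comps s)).map enc := by
  unfold splitDirs Pfx
  rw [fold_prefix_eq_map]
  simp [enc]

-- components produced by split('/') contain no '/'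
theorem go_nf : ∀ (fuel : Nat) (l cur : List Char) (acc : List (List Char)),
    l.length < fuel → (∀ p ∈ acc, '/' ∉ p) → '/' ∉ cur →
    ∀ p ∈ PySem.Chars.splitOn.go ['/'] fuel l cur acc, '/' ∉ p := by
  intro fuel
  induction fuel with
  | zero => intro l cur acc h; omega
  | succ f ih =>
    intro l cur acc hlen hacc hcur
    cases l with
    | nil =>
      intro p hp
      simp only [PySem.Chars.splitOn.go, List.mem_reverse, List.mem_cons] at hp
      rcases hp with hp | hp
      · subst hp; simp [hcur]
      · exact hacc p hp
    | cons c rest =>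
      by_cases hpre : (['/'] : List Char).isPrefixOf (c :: rest) = true
      · have hc : c = '/' := by
          simp [List.isPrefixOf] at hpre
          exact hpre.symm
        intro p hp
        rw [show PySem.Chars.splitOn.go ['/'] (f+1) (c :: rest) cur acc
            = PySem.Chars.splitOn.go ['/'] f (List.drop 1 (c :: rest)) [] (cur.reverse :: acc) from by
          conv_lhs => rw [PySem.Chars.splitOn.go]
          simp [hpre]] at hp
        refine ih rest [] (cur.reverse :: acc) (by simp at hlen ⊢; omega) ?_ (by simp) p hp
        intro q hq
        rcases List.mem_cons.mp hq with hq | hq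
        · subst hq; simp [hcur]
        · exact hacc q hq
      · have hc : c ≠ '/' := by
          intro hc; apply hpre
          subst hc; simp [List.isPrefixOf]
        intro p hp
        rw [show PySem.Chars.splitOn.go ['/'] (f+1) (c :: rest) cur acc
            = PySem.Chars.splitOn.go ['/'] f rest (c :: cur) acc from by
          conv_lhs => rw [PySem.Chars.splitOn.go]
          simp [hpre]] at hp
        refine ih rest (c :: cur) acc (by simp at hlen ⊢; omega) hacc ?_ p hp
        intro hmem
        rcases List.mem_cons.mp hmem with h | h
        · exact hc h.symm
        · exact hcur h

theorem NF_comps (s : String) : ∀ x ∈ comps s, '/' ∉ x := by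
  intro x hx
  unfold comps PySem.Chars.splitOn at hx
  exact go_nf _ _ [] [] (by omega) (by simp) (by simp) x hx

-- a '/'-free block before the first '/' is determined
theorem nosl_split : ∀ (a : List Char) (b x y : List Char), '/' ∉ a → '/' ∉ b →
    a ++ '/' :: x = b ++ '/' :: y → a = b ∧ x = y := by
  intro a
  induction a with
  | nil =>
    intro b x y _ hb h
    cases b with
    | nil => simp at h; simp [h]
    | cons hb' tb =>
      simp at h
      exact absurd (h.1 ▸ List.mem_cons_self) hb
  | cons ha ta ih =>
    intro b x y hna hnb h
    cases b with
    | nil =>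
      simp at h
      exact absurd (h.1 ▸ List.mem_cons_self) hna
    | cons hb tb =>
      simp only [List.cons_append, List.cons.injEq] at h
      obtain ⟨h1, h2⟩ := h
      have := ih tb x y (fun hm => hna (List.mem_cons_of_mem _ hm))
        (fun hm => hnb (List.mem_cons_of_mem _ hm)) h2
      exact ⟨by rw [h1, this.1], this.2⟩

theorem join_inj : ∀ (cs ds : List (List Char)), cs ≠ [] → ds ≠ [] →
    (∀ x ∈ cs, '/' ∉ x) → (∀ x ∈ ds, '/' ∉ x) →
    PySem.Chars.join ['/'] cs = PySem.Chars.join ['/'] ds → cs = ds := by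
  intro cs
  induction cs with
  | nil => intro ds h; exact absurd rfl h
  | cons a cs ih =>
    intro ds _ hds hn1 hn2 h
    cases ds with
    | nil => exact absurd rfl hds
    | cons b ds =>
      cases cs with
      | nil =>
        cases ds with
        | nil =>
          rw [PySem.Chars.join_singleton, PySem.Chars.join_singleton] at h
          rw [h]
        | cons d q =>
          rw [PySem.Chars.join_singleton, PySem.Chars.join_cons_cons] at h
          exfalso
          apply hn1 a List.mem_cons_self
          rw [h]; simp
      | cons c r =>
        cases ds with
        | nil =>
          rw [PySem.Chars.join_singleton, PySem.Chars.join_cons_cons] at h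
          exfalso
          apply hn2 b List.mem_cons_self
          rw [← h]; simp
        | cons d q =>
          rw [PySem.Chars.join_cons_cons, PySem.Chars.join_cons_cons] at h
          simp only [List.append_assoc, List.singleton_append] at h
          have hs := nosl_split a b _ _ (hn1 a List.mem_cons_self)
            (hn2 b List.mem_cons_self) h
          have := ih (d :: q) (by simp) (by simp)
            (fun x hx => hn1 x (List.mem_cons_of_mem _ hx))
            (fun x hx => hn2 x (List.mem_cons_of_mem _ hx)) hs.2
          rw [hs.1, this]

theorem enc_inj (cs ds : List (List Char)) (h1 : cs ≠ []) (h2 : ds ≠ [])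
    (n1 : ∀ x ∈ cs, '/' ∉ x) (n2 : ∀ x ∈ ds, '/' ∉ x) (h : enc cs = enc ds) : cs = ds := by
  unfold enc at h
  exact join_inj cs ds h1 h2 n1 n2 (List.cons.injEq .. ▸ h).2

theorem take_succ_ne_nil (cs : List (List Char)) (i : Nat) (hi : i < cs.length) :
    cs.take (i+1) ≠ [] := by
  intro h
  rw [List.take_eq_nil_iff] at h
  rcases h with h | h
  · omega
  · subst h; simp at hi

theorem mem_Pfx (p : List (List Char)) (cs : List (List Char)) :
    p ∈ Pfx cs ↔ p ≠ [] ∧ p <+: cs := by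
  unfold Pfx
  simp only [List.mem_map, List.mem_range]
  constructor
  · rintro ⟨i, hi, rfl⟩
    exact ⟨take_succ_ne_nil cs i hi, List.take_prefix _ _⟩
  · rintro ⟨hne, hpre⟩
    have hlen : p.length ≤ cs.length := hpre.length_le
    have hpos : 0 < p.length := List.length_pos_iff.mpr hne
    refine ⟨p.length - 1, by omega, ?_⟩
    have := List.prefix_iff_eq_take.mp hpre
    rw [show p.length - 1 + 1 = p.length from by omega]
    exact this.symm

theorem enc_mem_map_Pfx (p cs : List (List Char)) (hp : p ≠ [])
    (np : ∀ x ∈ p, '/' ∉ x) (ncs : ∀ x ∈ cs, '/' ∉ x) :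
    enc p ∈ (Pfx cs).map enc ↔ p <+: cs := by
  rw [List.mem_map]
  constructor
  · rintro ⟨q, hq, hqe⟩
    obtain ⟨hqne, hqp⟩ := (mem_Pfx q cs).mp hq
    have hq' : q = p := enc_inj q p hqne hp
      (fun x hx => ncs x (hqp.subset hx)) np hqe
    exact hq' ▸ hqp
  · intro hpre
    exact ⟨p, (mem_Pfx p cs).mpr ⟨hp, hpre⟩, rfl⟩

theorem nodup_map_enc_Pfx (cs : List (List Char)) (ncs : ∀ x ∈ cs, '/' ∉ x) :
    ((Pfx cs).map enc).Nodup := by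
  apply List.Nodup.map_on
  · intro q hq q' hq' he
    obtain ⟨hqne, hqp⟩ := (mem_Pfx q cs).mp hq
    obtain ⟨hqne', hqp'⟩ := (mem_Pfx q' cs).mp hq'
    exact enc_inj q q' hqne hqne' (fun x hx => ncs x (hqp.subset hx))
      (fun x hx => ncs x (hqp'.subset hx)) he
  · unfold Pfx
    apply List.Nodup.map_on
    · intro i hi j hj he
      have hi' := List.mem_range.mp hi
      have hj' := List.mem_range.mp hj
      have : (cs.take (i+1)).length = (cs.take (j+1)).length := by rw [he]
      simp only [List.length_take] at this
      omega
    · exact List.nodup_range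

-- hasPath: the component path is present in the trie
def hasPath : PTrie → List (List Char) → Bool
  | _, [] => true
  | .node ch, c :: cs => match findChild ch c with
    | some t => hasPath t cs
    | none => false

theorem hasPath_empty (ds : List (List Char)) :
    hasPath (PTrie.node .nil) ds = decide (ds = []) := by
  cases ds <;> simp [hasPath, findChild]


theorem findChild_replace_self : ∀ (ch : PChildren) (c : List Char) (t t' : PTrie),
    findChild ch c = some t → findChild (replaceChild ch c t') c = some t'
  | .nil, c, t, t', h => by simp [findChild] at h
  | .cons k u r, c, t, t', h => by
    by_cases hk : k = c
    · subst hk; simp [replaceChild, findChild]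
    · simp only [findChild, replaceChild, if_neg hk] at *
      exact findChild_replace_self r c t t' h

theorem findChild_replace_ne : ∀ (ch : PChildren) (c c' : List Char) (t' : PTrie), c' ≠ c →
    findChild (replaceChild ch c t') c' = findChild ch c'
  | .nil, _, _, _, _ => rfl
  | .cons k u r, c, c', t', h => by
    by_cases hk : k = c
    · subst hk
      have hk' : k ≠ c' := fun hh => h (hh ▸ rfl)
      simp [replaceChild, findChild, hk']
    · simp only [replaceChild, if_neg hk, findChild]
      by_cases hk' : k = c'
      · simp [hk']
      · simp only [if_neg hk']
        exact findChild_replace_ne r c c' t' h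

theorem findChild_append_self : ∀ (ch : PChildren) (c : List Char) (t' : PTrie),
    findChild ch c = none → findChild (appendChild ch c t') c = some t'
  | .nil, c, t', _ => by simp [appendChild, findChild]
  | .cons k u r, c, t', h => by
    by_cases hk : k = c
    · simp [findChild, hk] at h
    · simp only [findChild, if_neg hk] at h
      simp only [appendChild, findChild, if_neg hk]
      exact findChild_append_self r c t' h

theorem findChild_append_ne : ∀ (ch : PChildren) (c c' : List Char) (t' : PTrie), c' ≠ c →
    findChild (appendChild ch c t') c' = findChild ch c'
  | .nil, c, c', t', h => by
    have : c ≠ c' := fun hh => h hh.symm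
    simp [appendChild, findChild, this]
  | .cons k u r, c, c', t', h => by
    simp only [appendChild, findChild]
    by_cases hk' : k = c'
    · simp [hk']
    · simp only [if_neg hk']
      exact findChild_append_ne r c c' t' h

theorem hasPath_insertPath : ∀ (cs : List (List Char)) (T : PTrie) (ds : List (List Char)),
    hasPath (insertPath T cs) ds = (hasPath T ds || decide (ds <+: cs))
  | [], T, ds => by
    cases ds with
    | nil => simp [hasPath]
    | cons d ds' => simp [insertPath, List.prefix_nil]
  | c :: cs, .node ch, ds => by
    cases ds with
    | nil => simp [hasPath]
    | cons d ds' =>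
      cases hf : findChild ch c with
      | some t =>
        simp only [insertPath, hf]
        by_cases hd : d = c
        · subst hd
          simp only [hasPath, findChild_replace_self ch d t _ hf, hf,
            List.cons_prefix_cons, true_and]
          rw [hasPath_insertPath cs t ds']
        · have h1 := findChild_replace_ne ch c d (insertPath t cs) hd
          simp only [hasPath, h1, List.cons_prefix_cons]
          have : ¬ (d = c ∧ ds' <+: cs) := fun hh => hd hh.1
          simp [this]
      | none =>
        simp only [insertPath, hf]
        by_cases hd : d = c
        · subst hd
          simp only [hasPath, findChild_append_self ch d _ hf, hf,
            List.cons_prefix_cons]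
          rw [hasPath_insertPath cs (.node .nil) ds', hasPath_empty]
          by_cases hds : ds' = []
          · subst hds; simp
          · simp [hds]
        · have h1 := findChild_append_ne ch c d (insertPath (.node .nil) cs) hd
          simp only [hasPath, h1, List.cons_prefix_cons]
          have : ¬ (d = c ∧ ds' <+: cs) := fun hh => hd hh.1
          cases hf2 : findChild ch d <;> simp [this]

theorem countPath_fst : ∀ (cs : List (List Char)) (T : PTrie),
    (countPath T cs).1 = insertPath T cs
  | [], T => rfl
  | c :: cs, .node ch => by
    cases hf : findChild ch c with
    | some t => simp only [countPath, insertPath, hf]; rw [countPath_fst cs t]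
    | none => simp only [countPath, insertPath, hf]; rw [countPath_fst cs (.node .nil)]

theorem countPath_snd : ∀ (cs : List (List Char)) (T : PTrie),
    (countPath T cs).2
    = ((List.range cs.length).filter (fun i => !hasPath T (cs.take (i+1)))).length
  | [], T => rfl
  | c :: cs, .node ch => by
    rw [List.length_cons, List.range_succ_eq_map]
    cases hf : findChild ch c with
    | some t =>
      simp only [countPath, hf]
      rw [countPath_snd cs t]
      have h0 : hasPath (PTrie.node ch) ((c :: cs).take (0+1)) = true := by
        simp [hasPath, hf]
      simp only [List.filter_cons, h0, Bool.not_true, Bool.false_eq_true, if_false,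
        List.filter_map, List.length_map]
      apply congrArg
      apply List.filter_congr
      intro i _
      simp [Function.comp, hasPath, hf]
    | none =>
      simp only [countPath, hf]
      rw [countPath_snd cs (.node .nil)]
      have h0 : hasPath (PTrie.node ch) ((c :: cs).take (0+1)) = false := by
        simp [hasPath, hf]
      simp only [List.filter_cons, h0, Bool.not_false, if_true,
        List.filter_map, List.length_map, List.length_cons]
      have hall1 : ∀ i ∈ List.range cs.length,
          (!hasPath (PTrie.node .nil) (cs.take (i+1))) = true := by
        intro i hi
        rw [hasPath_empty]
        have : cs.take (i+1) ≠ [] := by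
          intro h
          rw [List.take_eq_nil_iff] at h
          have := List.mem_range.mp hi
          rcases h with h | h
          · omega
          · subst h; simp at this
        simp [this]
      have hall2 : ∀ i ∈ List.range cs.length,
          ((fun i => !hasPath (PTrie.node ch) ((c :: cs).take (i+1))) ∘ (· + 1)) i = true := by
        intro i hi
        simp [Function.comp, hasPath, hf]
      rw [List.filter_eq_self.mpr hall1, List.filter_eq_self.mpr hall2]

-- number of elements of L that A's counting loop sees as new, given the seen-set d
def countNew (d : PySem.Set (List Char)) : List (List Char) → Nat
  | [] => 0
  | a :: L => if PySem.Set.contains d a then countNew d L else 1 + countNew (PySem.Set.add d a) L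

theorem loop_count (L : List (List Char)) :
    ∀ (d : PySem.Set (List Char)) (ans : Int),
    (L.foldl (fun (st : Int × PySem.Set (List Char)) aa =>
      if PySem.Set.contains st.2 aa then st else (st.1 + 1, PySem.Set.add st.2 aa)) (ans, d)).1
    = ans + (countNew d L : Int) := by
  induction L with
  | nil => intros; simp [countNew]
  | cons a L ih =>
    intro d ans
    simp only [List.foldl_cons, countNew]
    cases hc : PySem.Set.contains d a with
    | true =>
      simp only [if_true]
      rw [ih]
    | false =>
      simp only [Bool.false_eq_true, if_false]
      rw [ih]
      push_cast
      ring

theorem loop_snd (L : List (List Char)) :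
    ∀ (d : PySem.Set (List Char)) (ans : Int),
    (L.foldl (fun (st : Int × PySem.Set (List Char)) aa =>
      if PySem.Set.contains st.2 aa then st else (st.1 + 1, PySem.Set.add st.2 aa)) (ans, d)).2
    = L.foldl PySem.Set.add d := by
  induction L with
  | nil => intros; rfl
  | cons a L ih =>
    intro d ans
    simp only [List.foldl_cons]
    cases hc : PySem.Set.contains d a with
    | true =>
      simp only [if_true]
      rw [ih, PySem.Set.add_of_mem ((PySem.Set.contains_iff d a).mp hc)]
    | false =>
      simp only [Bool.false_eq_true, if_false]
      rw [ih]

theorem countNew_nodup (L : List (List Char)) :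
    ∀ (d : PySem.Set (List Char)), L.Nodup →
    countNew d L = (L.filter (fun x => !PySem.Set.contains d x)).length := by
  induction L with
  | nil => intros; rfl
  | cons a L ih =>
    intro d hnd
    have ha : a ∉ L := (List.nodup_cons.mp hnd).1
    have hL : L.Nodup := (List.nodup_cons.mp hnd).2
    simp only [countNew, List.filter_cons]
    cases hc : PySem.Set.contains d a with
    | true => simp only [Bool.not_true, Bool.false_eq_true, if_false]; exact ih d hL
    | false =>
      simp only [Bool.false_eq_true, if_false, Bool.not_false, if_true, List.length_cons]
      rw [ih (PySem.Set.add d a) hL]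
      have : ∀ x ∈ L, (!PySem.Set.contains (PySem.Set.add d a) x) = (!PySem.Set.contains d x) := by
        intro x hx
        have hne : x ≠ a := fun h => ha (h ▸ hx)
        apply congrArg
        rw [Bool.eq_iff_iff, PySem.Set.contains_iff, PySem.Set.contains_iff, PySem.Set.mem_add]
        simp [hne]
      rw [List.filter_congr this]
      omega

-- the invariant: the trie answers exactly the membership questions the set answers
def INV (T : PTrie) (d : PySem.Set (List Char)) : Prop :=
  ∀ p : List (List Char), p ≠ [] → (∀ x ∈ p, '/' ∉ x) →
    hasPath T p = PySem.Set.contains d (enc p)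

theorem step_count (T : PTrie) (d : PySem.Set (List Char)) (cs : List (List Char))
    (hinv : INV T d) (ncs : ∀ x ∈ cs, '/' ∉ x) :
    ((countPath T cs).2 : Int) = countNew d ((Pfx cs).map enc) := by
  have h : (countPath T cs).2 = countNew d ((Pfx cs).map enc) := by
    rw [countPath_snd, countNew_nodup _ _ (nodup_map_enc_Pfx cs ncs)]
    rw [List.filter_map, List.length_map]
    unfold Pfx
    rw [List.filter_map, List.length_map]
    apply congrArg
    apply List.filter_congr
    intro i hi
    have hi' := List.mem_range.mp hi
    have hne := take_succ_ne_nil cs i hi'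
    have hnf : ∀ x ∈ cs.take (i+1), '/' ∉ x :=
      fun x hx => ncs x (List.take_subset _ _ hx)
    simp only [Function.comp_apply]
    exact congrArg (!·) (hinv _ hne hnf)
  exact_mod_cast h

theorem step_inv (T : PTrie) (d : PySem.Set (List Char)) (cs : List (List Char))
    (hinv : INV T d) (ncs : ∀ x ∈ cs, '/' ∉ x) :
    INV (insertPath T cs) (((Pfx cs).map enc).foldl PySem.Set.add d) := by
  intro p hpne hnp
  rw [hasPath_insertPath, hinv p hpne hnp, Bool.eq_iff_iff]
  have hm : ∀ x, x ∈ ((Pfx cs).map enc).foldl (fun s b => PySem.Set.add s b) d ↔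
      x ∈ d ∨ ∃ b ∈ (Pfx cs).map enc, x = b := fun x =>
    PySem.Set.mem_foldl_add ((Pfx cs).map enc) (fun b => b) d x
  have henc := enc_mem_map_Pfx p cs hpne hnp ncs
  simp only [Bool.or_eq_true, PySem.Set.contains_iff, decide_eq_true_eq, hm]
  constructor
  · rintro (h | h)
    · exact Or.inl h
    · exact Or.inr ⟨enc p, henc.mpr h, rfl⟩
  · rintro (h | ⟨b, hb, rfl⟩)
    · exact Or.inl h
    · exact Or.inr (henc.mp hb)

theorem main_newdirs : ∀ (nds : List String) (T : PTrie) (d : PySem.Set (List Char)) (ans : Int),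
    INV T d →
    (nds.foldl (fun st s =>
      (splitDirs s).foldl (fun (st : Int × PySem.Set (List Char)) aa =>
        if PySem.Set.contains st.2 aa then st else (st.1 + 1, PySem.Set.add st.2 aa)) st) (ans, d)).1
    = (nds.foldl (fun (st : PTrie × Int) s =>
        let r := countPath st.1 (comps s); (r.1, st.2 + (r.2 : Int))) (T, ans)).2 := by
  intro nds
  induction nds with
  | nil => intros; rfl
  | cons s nds ih =>
    intro T d ans hinv
    have ncs := NF_comps s
    simp only [List.foldl_cons]
    rw [splitDirs_eq s]
    have hA : (((Pfx (comps s)).map enc).foldl (fun (st : Int × PySem.Set (List Char)) aa =>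
        if PySem.Set.contains st.2 aa then st else (st.1 + 1, PySem.Set.add st.2 aa)) (ans, d))
        = (ans + (countNew d ((Pfx (comps s)).map enc) : Int),
           ((Pfx (comps s)).map enc).foldl PySem.Set.add d) := by
      rw [Prod.ext_iff]
      exact ⟨loop_count ((Pfx (comps s)).map enc) d ans,
             loop_snd ((Pfx (comps s)).map enc) d ans⟩
    rw [hA]
    rw [ih _ _ _ (step_inv T d (comps s) hinv ncs)]
    rw [countPath_fst (comps s) T, step_count T d (comps s) hinv ncs]

theorem hasPath_foldl_insert : ∀ (exs : List String) (T : PTrie) (p : List (List Char)),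
    hasPath (exs.foldl (fun t s => insertPath t (comps s)) T) p
    = (hasPath T p || exs.any (fun s => decide (p <+: comps s)))
  | [], T, p => by simp
  | s :: exs, T, p => by
    simp only [List.foldl_cons, List.any_cons]
    rw [hasPath_foldl_insert exs (insertPath T (comps s)) p, hasPath_insertPath]
    simp [Bool.or_assoc]

theorem mem_dfold : ∀ (exs : List String) (d : PySem.Set (List Char)) (x : List Char),
    x ∈ exs.foldl (fun d s => (splitDirs s).foldl PySem.Set.add d) d ↔
      x ∈ d ∨ ∃ s ∈ exs, x ∈ splitDirs s
  | [], d, x => by simp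
  | s :: exs, d, x => by
    simp only [List.foldl_cons, List.mem_cons]
    rw [mem_dfold exs _ x]
    have := PySem.Set.mem_foldl_add (splitDirs s) (fun b => b) d x
    simp only [this]
    constructor
    · rintro (( h | ⟨b, hb, rfl⟩) | ⟨t, ht, hx⟩)
      · exact Or.inl h
      · exact Or.inr ⟨s, Or.inl rfl, hb⟩
      · exact Or.inr ⟨t, Or.inr ht, hx⟩
    · rintro (h | ⟨t, (rfl | ht), hx⟩)
      · exact Or.inl (Or.inl h)
      · exact Or.inl (Or.inr ⟨x, hx, rfl⟩)
      · exact Or.inr ⟨t, ht, hx⟩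

theorem init_inv (exs : List String) :
    INV (exs.foldl (fun t s => insertPath t (comps s)) (PTrie.node .nil))
        (exs.foldl (fun d s => (splitDirs s).foldl PySem.Set.add d) PySem.Set.empty) := by
  intro p hpne hnp
  rw [hasPath_foldl_insert exs (PTrie.node .nil) p, hasPath_empty, Bool.eq_iff_iff,
    PySem.Set.contains_iff, mem_dfold exs PySem.Set.empty (enc p)]
  simp only [Bool.or_eq_true, decide_eq_true_eq, hpne, false_or,
    PySem.Set.empty, List.not_mem_nil, List.any_eq_true]
  constructor
  · rintro ⟨s, hs, hpre⟩
    refine ⟨s, hs, ?_⟩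
    rw [splitDirs_eq s]
    exact (enc_mem_map_Pfx p (comps s) hpne hnp (NF_comps s)).mpr hpre
  · rintro ⟨s, hs, hmem⟩
    rw [splitDirs_eq s] at hmem
    exact ⟨s, hs, (enc_mem_map_Pfx p (comps s) hpne hnp (NF_comps s)).mp hmem⟩

-- ===== VERDICT (by name: the statement is the Claim_ definition above) =====
theorem solve_spec : Claim_equal_solve := by
  intro inp _
  unfold Spec_solve solve solve_alt
  obtain ⟨n, m, ex, nd⟩ := inp
  simp only
  rw [main_newdirs nd _ _ 0 (init_inv ex)]
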